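-- pv_equiv track=rewrite | github.com/AnthonySchool728/TESTING-CHAMBER-NI-AJ | CarlFixes/carlcode.py | isValidHexInput
-- ===== SOURCE A (Python) =====
-- def isValidHexInput(sHexInput):
--     if sHexInput[0:2] == '0x':
--         validChars1 = ('a', 'b', 'c', 'd', 'e', 'f', '0', '1', '2', '3', '4', '5', '6', '7', '8', '9', '_')
--         for char in sHexInput[2:]:
--             if char not in validChars1:
--                 return False
--         return True
--     return False
-- ===== SOURCE B (Python) =====
-- import re
--
-- def isValidHexInput(sHexInput):
--     return bool(re.fullmatch(r'0x[0-9a-f_]*', sHexInput))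
-- ===== Notes on version B (the rewrite author's own statement) =====
-- stated objective: idiomatic
-- what changed: Replaces the manual prefix slice plus char-by-char tuple-membership loop with a single anchored regular expression fullmatch r'0x[0-9a-f_]*'.
import Mathlib
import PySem

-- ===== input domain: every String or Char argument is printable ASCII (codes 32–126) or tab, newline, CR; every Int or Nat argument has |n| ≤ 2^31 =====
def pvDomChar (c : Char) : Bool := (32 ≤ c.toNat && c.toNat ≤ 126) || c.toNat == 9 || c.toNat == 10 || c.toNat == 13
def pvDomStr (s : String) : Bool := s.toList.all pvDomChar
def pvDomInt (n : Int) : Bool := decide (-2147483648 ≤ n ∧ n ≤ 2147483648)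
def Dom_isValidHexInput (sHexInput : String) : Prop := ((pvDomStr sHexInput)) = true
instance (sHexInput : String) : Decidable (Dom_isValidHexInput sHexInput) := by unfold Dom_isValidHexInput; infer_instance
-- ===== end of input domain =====

-- B replaces A's slice-compare plus char-by-char tuple-membership loop with one anchored
-- regex fullmatch r'0x[0-9a-f_]*' (idiomatic; same asymptotic cost).

-- ===== PORT A =====
-- the tuple validChars1
def pvValidChars1 : List Char :=
  ['a', 'b', 'c', 'd', 'e', 'f', '0', '1', '2', '3', '4', '5', '6', '7', '8', '9', '_']

-- the 'for char in sHexInput[2:]' loop: first invalid char returns False, else True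
def pvLoopA : List Char → Bool
  | [] => true
  | c :: rest => if ¬ (pvValidChars1.contains c) then false else pvLoopA rest

def isValidHexInput (sHexInput : String) : Bool :=
  if PySem.Chars.slice sHexInput.toList (some 0) (some 2) = ['0', 'x'] then
    pvLoopA (PySem.Chars.slice sHexInput.toList (some 2) none)
  else false

-- ===== PORT B =====
-- Source B: bool(re.fullmatch(r'0x[0-9a-f_]*', s)). The regex-library call is ported by its
-- meaning: the literal prefix '0x', then zero or more characters of the class [0-9a-f_],
-- anchored at both ends of the string.
def pvClassB (c : Char) : Bool :=
  ('0' ≤ c && c ≤ '9') || ('a' ≤ c && c ≤ 'f') || c == '_'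

def isValidHexInput_alt (sHexInput : String) : Bool :=
  match sHexInput.toList with
  | '0' :: 'x' :: rest => rest.all pvClassB
  | _ => false

-- ===== PRECONDITION & SPEC =====
def Spec_isValidHexInput (sHexInput : String) (out : Bool) : Prop := out = isValidHexInput_alt sHexInput
instance (sHexInput : String) (out : Bool) : Decidable (Spec_isValidHexInput sHexInput out) := by unfold Spec_isValidHexInput; infer_instance

-- ===== CLAIM (what is proved, stated in full; the proofs are below) =====
def Claim_equal_isValidHexInput : Prop := ∀ (sHexInput : String), Dom_isValidHexInput sHexInput → Spec_isValidHexInput sHexInput (isValidHexInput sHexInput)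

-- ===== LEMMAS AND PROOFS =====

-- characters with equal code points are equal
theorem pvCharOf {c d : Char} (h : c.val.toNat = d.val.toNat) : c = d :=
  Char.ext (UInt32.toNat_inj.mp h)

-- A's tuple-membership test agrees with B's regex character class on every character
theorem pvChar_eq (c : Char) : pvValidChars1.contains c = pvClassB c := by
  rw [Bool.eq_iff_iff]
  simp only [pvValidChars1, pvClassB, List.contains_cons, List.contains_nil, Bool.or_false,
    Bool.or_eq_true, Bool.and_eq_true, beq_iff_eq, decide_eq_true_eq,
    Char.le_def, UInt32.le_iff_toNat_le]
  constructor
  · rintro (h|h|h|h|h|h|h|h|h|h|h|h|h|h|h|h|h) <;> subst h <;> decide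
  · rintro (⟨h1,h2⟩|⟨h1,h2⟩|h)
    · have e : c.val.toNat = '0'.val.toNat ∨ c.val.toNat = '1'.val.toNat ∨
        c.val.toNat = '2'.val.toNat ∨ c.val.toNat = '3'.val.toNat ∨
        c.val.toNat = '4'.val.toNat ∨ c.val.toNat = '5'.val.toNat ∨
        c.val.toNat = '6'.val.toNat ∨ c.val.toNat = '7'.val.toNat ∨
        c.val.toNat = '8'.val.toNat ∨ c.val.toNat = '9'.val.toNat := by
        have a0 : '0'.val.toNat = 48 := by decide
        have a1 : '1'.val.toNat = 49 := by decide
        have a2 : '2'.val.toNat = 50 := by decide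
        have a3 : '3'.val.toNat = 51 := by decide
        have a4 : '4'.val.toNat = 52 := by decide
        have a5 : '5'.val.toNat = 53 := by decide
        have a6 : '6'.val.toNat = 54 := by decide
        have a7 : '7'.val.toNat = 55 := by decide
        have a8 : '8'.val.toNat = 56 := by decide
        have a9 : '9'.val.toNat = 57 := by decide
        omega
      rcases e with h|h|h|h|h|h|h|h|h|h <;> have := pvCharOf h <;> tauto
    · have e : c.val.toNat = 'a'.val.toNat ∨ c.val.toNat = 'b'.val.toNat ∨
        c.val.toNat = 'c'.val.toNat ∨ c.val.toNat = 'd'.val.toNat ∨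
        c.val.toNat = 'e'.val.toNat ∨ c.val.toNat = 'f'.val.toNat := by
        have a0 : 'a'.val.toNat = 97 := by decide
        have a1 : 'b'.val.toNat = 98 := by decide
        have a2 : 'c'.val.toNat = 99 := by decide
        have a3 : 'd'.val.toNat = 100 := by decide
        have a4 : 'e'.val.toNat = 101 := by decide
        have a5 : 'f'.val.toNat = 102 := by decide
        omega
      rcases e with h|h|h|h|h|h <;> have := pvCharOf h <;> tauto
    · tauto

-- A's early-return loop equals B's List.all over the class
theorem pvLoopA_eq (l : List Char) : pvLoopA l = l.all pvClassB := by
  induction l with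
  | nil => rfl
  | cons c rest ih =>
    simp only [pvLoopA, pvChar_eq, List.all_cons, ih]
    by_cases h : pvClassB c = true <;> simp [h]

-- ===== VERDICT (by name: the statement is the Claim_ definition above) =====
theorem isValidHexInput_spec : Claim_equal_isValidHexInput := by
  intro s _
  unfold Spec_isValidHexInput isValidHexInput isValidHexInput_alt
  rw [PySem.Chars.slice_eq_listSlice, PySem.Chars.slice_eq_listSlice,
    PySem.List.slice_zero_start, PySem.List.slice_to (hb := by norm_num),
    PySem.List.slice_from (ha := by norm_num)]
  match s.toList with
  | [] =>
    rw [show List.take (Int.toNat 2) ([] : List Char) = [] from rfl,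
      if_neg (by decide)]
  | [c] =>
    rw [show List.take (Int.toNat 2) [c] = [c] from rfl, if_neg (by simp)]
    split
    · next heq => simp at heq
    · rfl
  | c :: d :: rest =>
    rw [show List.take (Int.toNat 2) (c :: d :: rest) = [c, d] from rfl,
      show List.drop (Int.toNat 2) (c :: d :: rest) = rest from rfl]
    by_cases hc : c = '0' ∧ d = 'x'
    · obtain ⟨rfl, rfl⟩ := hc
      rw [if_pos rfl, pvLoopA_eq]
      rfl
    · have hne : ¬ ([c, d] = ['0', 'x']) := by
        intro he; apply hc; injection he with h1 h2; injection h2 with h2 _; exact ⟨h1, h2⟩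
      rw [if_neg hne]
      split
      · next heq =>
        exfalso; apply hc
        injection heq with h1 h2; injection h2 with h2 _; exact ⟨h1, h2⟩
      · rfl
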